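-- pv_equiv track=rewrite | github.com/aadishgoel/Cryptography-Codes | playfair.py | transform
-- ===== SOURCE A (Python) =====
-- def transform(data,ss='x'):
--     '''Transforming data in sets of 2-2 and using special symbol '''
--     data = [data[i:i+2] for i in range(0,len(data),2)]  #Splitting data in 2-2
--     new = []
--     for item in data:                                   #Inserting Special Symbol
--         if len(item)==1: new.append((item[0],ss))
--         elif item[0]==item[1]: new.extend([(item[0],ss),(item[0],ss)])
--         else: new.append((item[0],item[1]))
--     return new
-- ===== SOURCE B (Python) =====
-- def transform(data, ss='x'):
--     '''Single pass over the characters with a pending-first-char buffer.'''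
--     new = []
--     pending = None
--     for c in data:
--         if pending is None:
--             pending = c
--         elif pending == c:
--             new.append((pending, ss))
--             new.append((pending, ss))
--             pending = None
--         else:
--             new.append((pending, c))
--             pending = None
--     if pending is not None:
--         new.append((pending, ss))
--     return new
-- ===== Notes on version B (the rewrite author's own statement) =====
-- stated objective: simpler
-- what changed: Replaced the slice-comprehension that pre-builds a list of 2-char chunks followed by a second loop with a single pass over the characters keeping a pending-first-char buffer.
import Mathlib
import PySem

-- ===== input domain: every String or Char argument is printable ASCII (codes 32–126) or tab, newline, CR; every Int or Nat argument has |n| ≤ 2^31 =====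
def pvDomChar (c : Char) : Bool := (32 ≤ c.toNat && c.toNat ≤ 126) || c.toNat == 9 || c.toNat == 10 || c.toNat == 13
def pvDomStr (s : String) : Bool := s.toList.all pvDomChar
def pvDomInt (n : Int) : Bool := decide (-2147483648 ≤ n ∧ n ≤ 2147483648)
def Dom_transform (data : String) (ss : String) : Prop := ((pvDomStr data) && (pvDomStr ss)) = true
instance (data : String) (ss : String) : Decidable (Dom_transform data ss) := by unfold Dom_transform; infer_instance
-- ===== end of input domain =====

-- B replaces A's pre-built list of 2-char slices plus second append loop with one pass over
-- the characters keeping a pending-first-char buffer (objective: simpler, same O(n) cost).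

-- ===== PORT A =====
-- literal port of A; strings handled as List Char (PySem convention); the pyGetD default ' '
-- is never reached: every chunk the comprehension produces is nonempty
def transform (data : String) (ss : String) : List (String × String) :=
  -- data = [data[i:i+2] for i in range(0,len(data),2)]
  let chunks : List (List Char) :=
    (PySem.List.pyRange 0 (PySem.Str.len data) 2).map
      (fun i => PySem.List.slice data.toList (some i) (some (i + 2)))
  -- new = [] ; for item in data: …
  chunks.foldl
    (fun new item =>
      if item.length == 1 then
        new ++ [(String.ofList [PySem.List.pyGetD item 0 ' '], ss)]
      else if PySem.List.pyGetD item 0 ' ' == PySem.List.pyGetD item 1 ' ' then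
        new ++ [(String.ofList [PySem.List.pyGetD item 0 ' '], ss),
                (String.ofList [PySem.List.pyGetD item 0 ' '], ss)]
      else
        new ++ [(String.ofList [PySem.List.pyGetD item 0 ' '],
                 String.ofList [PySem.List.pyGetD item 1 ' '])])
    []

-- ===== PORT B =====
-- literal port of Source B: one foldl over the characters, state = (output so far, pending first char)
def transform_alt (data : String) (ss : String) : List (String × String) :=
  let r :=
    data.toList.foldl
      (fun (acc : List (String × String) × Option Char) c =>
        match acc.2 with
        | none => (acc.1, some c)
        | some p =>
          if p == c then
            (acc.1 ++ [(String.ofList [p], ss), (String.ofList [p], ss)], none)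
          else
            (acc.1 ++ [(String.ofList [p], String.ofList [c])], none))
      ([], none)
  match r.2 with
  | none => r.1
  | some p => r.1 ++ [(String.ofList [p], ss)]

-- ===== PRECONDITION & SPEC =====
def Spec_transform (data : String) (ss : String) (out : List (String × String)) : Prop := out = transform_alt data ss
instance (data : String) (ss : String) (out : List (String × String)) : Decidable (Spec_transform data ss out) := by unfold Spec_transform; infer_instance

-- ===== CLAIM (what is proved, stated in full; the proofs are below) =====
def Claim_equal_transform : Prop := ∀ (data : String) (ss : String), Dom_transform data ss → Spec_transform data ss (transform data ss)

-- ===== LEMMAS AND PROOFS =====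

-- common reference form: the pair blocks, two characters of the input at a time
def pvPairs (ss : String) : List Char → List (String × String)
  | [] => []
  | [a] => [(String.ofList [a], ss)]
  | a :: b :: rest =>
      (if a == b then [(String.ofList [a], ss), (String.ofList [a], ss)]
       else [(String.ofList [a], String.ofList [b])]) ++ pvPairs ss rest

-- two-characters-at-a-time induction principle
theorem pvTwoStep {motive : List Char → Prop} (h0 : motive []) (h1 : ∀ a, motive [a])
    (h2 : ∀ a b rest, motive rest → motive (a :: b :: rest)) : ∀ cs, motive cs
  | [] => h0
  | [_] => h1 _
  | _ :: _ :: rest => h2 _ _ rest (pvTwoStep h0 h1 h2 rest)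

-- the chunk list A's comprehension builds
def pvChunksA (cs : List Char) : List (List Char) :=
  (PySem.List.pyRange 0 (cs.length : Int) 2).map
    (fun i => PySem.List.slice cs (some i) (some (i + 2)))

theorem pvChunksA_nil : pvChunksA [] = [] := by decide

theorem pvChunksA_single (a : Char) : pvChunksA [a] = [[a]] := by
  simp [pvChunksA, PySem.List.pyRange, PySem.List.slice, PySem.List.clampIdx]

theorem pvChunksA_cons2 (a b : Char) (rest : List Char) :
    pvChunksA (a :: b :: rest) = [a, b] :: pvChunksA rest := by
  unfold pvChunksA
  rw [PySem.List.pyRange_of_pos _ _ (by norm_num),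
      PySem.List.pyRange_of_pos _ _ (by norm_num)]
  have hlen : ((a :: b :: rest).length : Int) = (rest.length : Int) + 2 := by
    simp; omega
  rw [hlen]
  have hcount1 : (if (0:Int) < (rest.length : Int) + 2 then
      (((rest.length : Int) + 2 - 0 + 2 - 1) / 2).toNat else 0) = (rest.length + 1) / 2 + 1 := by
    split_ifs with h <;> omega
  have hcount2 : (if (0:Int) < (rest.length : Int) then
      (((rest.length : Int) - 0 + 2 - 1) / 2).toNat else 0) = (rest.length + 1) / 2 := by
    split_ifs with h <;> omega
  rw [hcount1, hcount2, List.range_succ_eq_map]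
  simp only [List.map_cons, List.map_map]
  rw [List.cons_eq_cons]
  refine ⟨?_, ?_⟩
  · -- head chunk is [a, b]
    rw [PySem.List.slice_toNat _ (by positivity) (by positivity)]
    simp
  · -- tail chunks: slice of a::b::rest at 2(k+1) = slice of rest at 2k
    refine List.map_congr_left ?_
    intro k _
    simp only [Function.comp_apply]
    rw [PySem.List.slice_toNat _ (by positivity) (by positivity),
        PySem.List.slice_toNat _ (by positivity) (by positivity)]
    have h1 : ((0:Int) + 2 * ((k : Nat).succ : Int)).toNat = 2 * k + 2 := by omega
    have h2 : ((0:Int) + 2 * ((k : Nat).succ : Int) + 2).toNat = 2 * k + 4 := by omega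
    have h3 : ((0:Int) + 2 * (k : Int)).toNat = 2 * k := by omega
    have h4 : ((0:Int) + 2 * (k : Int) + 2).toNat = 2 * k + 2 := by omega
    rw [h1, h2, h3, h4]
    have hdrop : (a :: b :: rest).drop (2 * k + 2) = rest.drop (2 * k) := by
      simp [List.drop_succ_cons]
    rw [hdrop]
    congr 1
    omega

-- A's fold over the chunk list produces the pair blocks
theorem pvA_eq_pairs (ss : String) (cs : List Char) :
    (pvChunksA cs).foldl
      (fun new item =>
        if item.length == 1 then
          new ++ [(String.ofList [PySem.List.pyGetD item 0 ' '], ss)]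
        else if PySem.List.pyGetD item 0 ' ' == PySem.List.pyGetD item 1 ' ' then
          new ++ [(String.ofList [PySem.List.pyGetD item 0 ' '], ss),
                  (String.ofList [PySem.List.pyGetD item 0 ' '], ss)]
        else
          new ++ [(String.ofList [PySem.List.pyGetD item 0 ' '],
                   String.ofList [PySem.List.pyGetD item 1 ' '])])
      [] = pvPairs ss cs := by
  rw [show (fun (new : List (String × String)) (item : List Char) =>
        if item.length == 1 then
          new ++ [(String.ofList [PySem.List.pyGetD item 0 ' '], ss)]
        else if PySem.List.pyGetD item 0 ' ' == PySem.List.pyGetD item 1 ' ' then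
          new ++ [(String.ofList [PySem.List.pyGetD item 0 ' '], ss),
                  (String.ofList [PySem.List.pyGetD item 0 ' '], ss)]
        else
          new ++ [(String.ofList [PySem.List.pyGetD item 0 ' '],
                   String.ofList [PySem.List.pyGetD item 1 ' '])]) =
      (fun new item => new ++
        (if item.length == 1 then
          [(String.ofList [PySem.List.pyGetD item 0 ' '], ss)]
        else if PySem.List.pyGetD item 0 ' ' == PySem.List.pyGetD item 1 ' ' then
          [(String.ofList [PySem.List.pyGetD item 0 ' '], ss),
           (String.ofList [PySem.List.pyGetD item 0 ' '], ss)]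
        else
          [(String.ofList [PySem.List.pyGetD item 0 ' '],
            String.ofList [PySem.List.pyGetD item 1 ' '])]))
      from by funext new item; split_ifs <;> rfl]
  rw [PySem.List.foldl_append_eq_flatMap, List.nil_append]
  induction cs using pvTwoStep with
  | h0 => rw [pvChunksA_nil]; rfl
  | h1 a =>
    rw [pvChunksA_single]
    simp [pvPairs, PySem.List.pyGetD]
  | h2 a b rest ih =>
    rw [pvChunksA_cons2, List.flatMap_cons, ih]
    have g0 : PySem.List.pyGetD [a, b] 0 ' ' = a := by
      simp [PySem.List.pyGetD]
    have g1 : PySem.List.pyGetD [a, b] 1 ' ' = b := by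
      simp [PySem.List.pyGetD]
    show (if ([a, b].length == 1) = true then _
          else if (PySem.List.pyGetD [a, b] 0 ' ' == PySem.List.pyGetD [a, b] 1 ' ') = true then _
          else _) ++ _ = _
    rw [if_neg (by simp), g0, g1, pvPairs]

-- named forms of B's loop body and final step (used only by the proofs; transform_alt's
-- lambda is definitionally pvStep ss)
def pvStep (ss : String) (acc : List (String × String) × Option Char) (c : Char) :
    List (String × String) × Option Char :=
  match acc.2 with
  | none => (acc.1, some c)
  | some p =>
    if p == c then
      (acc.1 ++ [(String.ofList [p], ss), (String.ofList [p], ss)], none)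
    else
      (acc.1 ++ [(String.ofList [p], String.ofList [c])], none)

def pvFin (ss : String) (r : List (String × String) × Option Char) : List (String × String) :=
  match r.2 with
  | none => r.1
  | some p => r.1 ++ [(String.ofList [p], ss)]

-- B's fold with a pending buffer produces the same pair blocks
theorem pvB_eq_pairs (ss : String) (cs : List Char) : ∀ new : List (String × String),
    pvFin ss (cs.foldl (pvStep ss) (new, none)) = new ++ pvPairs ss cs := by
  induction cs using pvTwoStep with
  | h0 => intro new; simp [pvFin, pvPairs]
  | h1 a => intro new; simp [pvFin, pvStep, pvPairs]
  | h2 a b rest ih =>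
    intro new
    by_cases hab : (a == b) = true
    · have hstep : (a :: b :: rest).foldl (pvStep ss) (new, none) =
          rest.foldl (pvStep ss) (new ++ [(String.ofList [a], ss), (String.ofList [a], ss)], none) := by
        simp [pvStep, hab]
      rw [hstep, ih, pvPairs, if_pos hab, List.append_assoc]
    · have hstep : (a :: b :: rest).foldl (pvStep ss) (new, none) =
          rest.foldl (pvStep ss) (new ++ [(String.ofList [a], String.ofList [b])], none) := by
        simp [pvStep, hab]
      rw [hstep, ih, pvPairs, if_neg hab, List.append_assoc]

-- ===== VERDICT (by name: the statement is the Claim_ definition above) =====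
theorem transform_spec : Claim_equal_transform := by
  intro data ss _
  unfold Spec_transform transform
  rw [show ((PySem.List.pyRange 0 (PySem.Str.len data) 2).map
        (fun i => PySem.List.slice data.toList (some i) (some (i + 2)))) = pvChunksA data.toList
      from by rw [pvChunksA, PySem.Str.len_eq]]
  rw [pvA_eq_pairs ss data.toList]
  have hb : transform_alt data ss = pvFin ss (data.toList.foldl (pvStep ss) ([], none)) := rfl
  rw [hb, pvB_eq_pairs ss data.toList [], List.nil_append]
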